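-- pv_equiv track=rewrite | github.com/career-prep/ucp-namer-latam-2026 | homework1/misrak_woldu/q7_KAnagrams.py | k_anagrams
-- ===== SOURCE A (Python) =====
-- from typing import Dict
-- from collections import Counter
--
-- def k_anagrams(first_string: str, second_string: str, k: int) -> bool:
--     """
--     Return True if first_string and second_string are k-anagrams.
--     Two strings are k-anagrams if we can change at most k characters in ONE string
--     to make the two strings anagrams of each other.
--     """
--
--     if len(first_string) != len(second_string):
--         return False
--
--     first_counts: Dict[str, int] = Counter(first_string)
--
--     second_counts: Dict[str, int] = Counter(second_string)
--
--     changes_needed = 0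
--
--     for character_in_first, count_in_first in first_counts.items():
--         count_in_second = second_counts.get(character_in_first, 0)
--
--         if count_in_first > count_in_second:
--             changes_needed += (count_in_first - count_in_second)
--
--         if changes_needed > k:
--             return False
--
--     return changes_needed <= k
-- ===== SOURCE B (Python) =====
-- def k_anagrams(first_string: str, second_string: str, k: int) -> bool:
--     if len(first_string) != len(second_string):
--         return False
--     a = sorted(first_string)
--     b = sorted(second_string)
--     i = j = common = 0
--     while i < len(a) and j < len(b):
--         if a[i] == b[j]:
--             common += 1
--             i += 1
--             j += 1
--         elif a[i] < b[j]:
--             i += 1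
--         else:
--             j += 1
--     return len(first_string) - common <= k
-- ===== Notes on version B (the rewrite author's own statement) =====
-- stated objective: alternative
-- what changed: Replaces counter-difference accumulation by sort-both-strings plus a two-pointer merge counting the common multiset elements; changes needed = length - common.
import Mathlib
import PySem

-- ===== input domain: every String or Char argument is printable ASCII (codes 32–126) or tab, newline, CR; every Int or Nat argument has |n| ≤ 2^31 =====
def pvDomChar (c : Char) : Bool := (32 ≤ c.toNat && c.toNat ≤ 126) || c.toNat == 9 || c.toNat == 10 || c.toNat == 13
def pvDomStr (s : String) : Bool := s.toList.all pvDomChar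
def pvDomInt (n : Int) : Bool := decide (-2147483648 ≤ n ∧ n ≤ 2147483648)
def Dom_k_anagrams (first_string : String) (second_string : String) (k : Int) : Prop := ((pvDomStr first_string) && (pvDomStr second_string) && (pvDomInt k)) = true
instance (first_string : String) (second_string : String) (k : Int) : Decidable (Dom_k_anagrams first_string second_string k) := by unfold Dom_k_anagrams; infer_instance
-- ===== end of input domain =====

-- B replaces A's counter-difference accumulation by sorting both strings and counting the
-- common multiset elements with a two-pointer merge scan; changes needed = length - common
-- (objective: alternative; not faster).

-- ===== PORT A =====
-- the 'for character_in_first, count_in_first in first_counts.items():' loop with the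
-- in-loop 'return False' early exit, state = changes_needed
def kaLoopA : List (Char × Int) → PySem.Dict Char Int → Int → Int → Bool
  | [], _, k, changes_needed => decide (changes_needed ≤ k)
  | (character_in_first, count_in_first) :: rest, second_counts, k, changes_needed =>
    let count_in_second := second_counts.getD character_in_first 0
    let changes_needed' :=
      if count_in_first > count_in_second
      then changes_needed + (count_in_first - count_in_second)
      else changes_needed
    if changes_needed' > k then false
    else kaLoopA rest second_counts k changes_needed'

def k_anagrams (first_string : String) (second_string : String) (k : Int) : Bool :=
  if PySem.Str.len first_string ≠ PySem.Str.len second_string then false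
  else
    let first_counts := PySem.Dict.counter first_string.toList
    let second_counts := PySem.Dict.counter second_string.toList
    kaLoopA first_counts.items second_counts k 0

-- ===== PORT B =====
-- the two-pointer 'while i < len(a) and j < len(b)' merge scan over the two sorted lists;
-- advancing a pointer = dropping the head of the corresponding list
def kaCommon : List Char → List Char → Int
  | [], _ => 0
  | _ :: _, [] => 0
  | a :: as, b :: bs =>
    if a = b then 1 + kaCommon as bs
    else if a < b then kaCommon as (b :: bs)
    else kaCommon (a :: as) bs
termination_by l1 l2 => l1.length + l2.length

def k_anagrams_alt (first_string : String) (second_string : String) (k : Int) : Bool :=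
  if PySem.Str.len first_string ≠ PySem.Str.len second_string then false
  else
    let a := PySem.List.sorted first_string.toList (fun c => c) false
    let b := PySem.List.sorted second_string.toList (fun c => c) false
    decide (PySem.Str.len first_string - kaCommon a b ≤ k)

-- ===== PRECONDITION & SPEC =====
def Spec_k_anagrams (first_string : String) (second_string : String) (k : Int) (out : Bool) : Prop := out = k_anagrams_alt first_string second_string k
instance (first_string : String) (second_string : String) (k : Int) (out : Bool) : Decidable (Spec_k_anagrams first_string second_string k out) := by unfold Spec_k_anagrams; infer_instance

-- ===== CLAIM =====
def Claim_equal_k_anagrams : Prop := ∀ (first_string : String) (second_string : String) (k : Int), Dom_k_anagrams first_string second_string k → Spec_k_anagrams first_string second_string k (k_anagrams first_string second_string k)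

-- ===== LEMMAS AND PROOFS =====

-- the surplus the A-loop accumulates, as a sum over the counter items
def kaSurplus (l : List (Char × Int)) (d2 : PySem.Dict Char Int) : Int :=
  (l.map (fun p => max 0 (p.2 - d2.getD p.1 0))).sum

lemma kaSurplus_nonneg (l : List (Char × Int)) (d2 : PySem.Dict Char Int) :
    0 ≤ kaSurplus l d2 := by
  induction l with
  | nil => simp [kaSurplus]
  | cons p rest ih =>
    have h : kaSurplus (p :: rest) d2 = max 0 (p.2 - d2.getD p.1 0) + kaSurplus rest d2 := by
      simp [kaSurplus]
    rw [h]; omega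

lemma kaLoopA_eq (l : List (Char × Int)) (d2 : PySem.Dict Char Int) (k ch : Int) :
    kaLoopA l d2 k ch = decide (ch + kaSurplus l d2 ≤ k) := by
  induction l generalizing ch with
  | nil => simp [kaLoopA, kaSurplus]
  | cons p rest ih =>
    obtain ⟨c, n⟩ := p
    have hrest := kaSurplus_nonneg rest d2
    have hsum : kaSurplus ((c, n) :: rest) d2
        = max 0 (n - d2.getD c 0) + kaSurplus rest d2 := by
      simp [kaSurplus]
    rw [hsum]
    show (if (if n > d2.getD c 0 then ch + (n - d2.getD c 0) else ch) > k then false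
          else kaLoopA rest d2 k (if n > d2.getD c 0 then ch + (n - d2.getD c 0) else ch))
        = decide (ch + (max 0 (n - d2.getD c 0) + kaSurplus rest d2) ≤ k)
    split_ifs with h1 h2 h2 <;> try rw [ih]
    · symm; simp only [decide_eq_false_iff_not]; omega
    · simp only [decide_eq_decide]; omega
    · symm; simp only [decide_eq_false_iff_not]; omega
    · simp only [decide_eq_decide]; omega

-- multiset intersection helpers
lemma inter_cons_right_of_notMem {b : Char} (s t : Multiset Char) (h : b ∉ s) :
    s ∩ (b ::ₘ t) = s ∩ t := by
  apply Multiset.ext.mpr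
  intro c
  by_cases hc : c = b
  · subst hc
    simp [Multiset.count_inter, Multiset.count_eq_zero_of_notMem h]
  · simp [Multiset.count_inter, hc]

lemma cons_inter_cons_same (a : Char) (s t : Multiset Char) :
    (a ::ₘ s) ∩ (a ::ₘ t) = a ::ₘ (s ∩ t) := by
  rw [Multiset.cons_inter_of_pos _ (Multiset.mem_cons_self a t), Multiset.erase_cons_head]

-- the merge scan on two nondecreasing lists counts the multiset intersection
lemma kaCommon_eq (l1 l2 : List Char)
    (h1 : l1.Pairwise (· ≤ ·)) (h2 : l2.Pairwise (· ≤ ·)) :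
    kaCommon l1 l2 = (((l1 : Multiset Char) ∩ (l2 : Multiset Char)).card : Int) := by
  revert h1 h2
  induction l1, l2 using kaCommon.induct with
  | case1 l2 => intro _ _; simp [kaCommon]
  | case2 a as => intro _ _; simp [kaCommon]
  | case3 as b bs ih =>
    intro h1 h2
    rw [List.pairwise_cons] at h1 h2
    rw [show kaCommon (b :: as) (b :: bs) = 1 + kaCommon as bs from by
      simp [kaCommon]]
    rw [ih h1.2 h2.2]
    rw [show ((b :: as : List Char) : Multiset Char) = b ::ₘ (as : Multiset Char) from rfl,
        show ((b :: bs : List Char) : Multiset Char) = b ::ₘ (bs : Multiset Char) from rfl,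
        cons_inter_cons_same, Multiset.card_cons]
    push_cast; ring
  | case4 a as b bs hab hlt ih =>
    intro h1 h2
    rw [List.pairwise_cons] at h1 h2
    have hnot : a ∉ ((b :: bs : List Char) : Multiset Char) := by
      intro hmem
      rcases List.mem_cons.mp (Multiset.mem_coe.mp hmem) with h | h
      · exact hab h
      · exact absurd (h2.1 a h) (not_le.mpr hlt)
    rw [show kaCommon (a :: as) (b :: bs) = kaCommon as (b :: bs) from by
      rw [kaCommon]; rw [if_neg hab, if_pos hlt]]
    rw [ih h1.2 (List.pairwise_cons.mpr h2)]
    rw [show ((a :: as : List Char) : Multiset Char) = a ::ₘ (as : Multiset Char) from rfl,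
        Multiset.cons_inter_of_neg _ hnot]
  | case5 a as b bs hab hge ih =>
    intro h1 h2
    rw [List.pairwise_cons] at h1 h2
    have hba : b < a := by
      rcases lt_trichotomy a b with h | h | h
      · exact absurd h hge
      · exact absurd h hab
      · exact h
    have hnot : b ∉ ((a :: as : List Char) : Multiset Char) := by
      intro hmem
      rcases List.mem_cons.mp (Multiset.mem_coe.mp hmem) with h | h
      · exact absurd h (ne_of_lt hba)
      · exact absurd (h1.1 b h) (not_le.mpr hba)
    rw [show kaCommon (a :: as) (b :: bs) = kaCommon (a :: as) bs from by
      rw [kaCommon]; rw [if_neg hab, if_neg hge]]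
    rw [ih (List.pairwise_cons.mpr h1) h2.2]
    rw [show ((b :: bs : List Char) : Multiset Char) = b ::ₘ (bs : Multiset Char) from rfl,
        inter_cons_right_of_notMem _ _ hnot]

-- sum of a function over a nodup list equals the Finset sum over its toFinset
lemma sum_map_nodup (u : List Char) (hu : u.Nodup) (f : Char → Int) :
    (u.map f).sum = ∑ c ∈ u.toFinset, f c := by
  rw [List.sum_toFinset f hu]

-- surplus of l1 over l2 = |l1| - |l1 ∩ l2| (multiset intersection)
lemma surplus_eq_length_sub_inter (l1 l2 : List Char) :
    ∑ c ∈ l1.toFinset, max 0 ((l1.count c : Int) - (l2.count c : Int))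
      = (l1.length : Int) - (((l1 : Multiset Char) ∩ (l2 : Multiset Char)).card : Int) := by
  set m := (l1 : Multiset Char) ∩ (l2 : Multiset Char) with hm
  have hcard : m.card = ∑ c ∈ l1.toFinset, min (l1.count c) (l2.count c) := by
    rw [← Multiset.toFinset_sum_count_eq m]
    rw [Finset.sum_subset (by
      intro c hc
      simp only [Multiset.mem_toFinset, hm, Multiset.mem_inter] at hc
      exact List.mem_toFinset.mpr (by exact_mod_cast hc.1))]
    · apply Finset.sum_congr rfl
      intro c _
      simp [hm]
    · intro c _ hc
      simp only [Multiset.mem_toFinset] at hc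
      exact Multiset.count_eq_zero_of_notMem hc
  have hlen : ∑ c ∈ l1.toFinset, (l1.count c : Int) = (l1.length : Int) := by
    have := List.sum_toFinset_count_eq_length l1
    push_cast [← this]
    rfl
  rw [hcard]
  push_cast
  rw [← hlen, ← Finset.sum_sub_distrib]
  apply Finset.sum_congr rfl
  intro c _
  omega

-- ===== VERDICT =====
theorem k_anagrams_spec : Claim_equal_k_anagrams := by
  intro f s k _
  unfold Spec_k_anagrams k_anagrams k_anagrams_alt
  by_cases hlen : PySem.Str.len f ≠ PySem.Str.len s
  · rw [if_pos hlen, if_pos hlen]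
  · rw [if_neg hlen, if_neg hlen]
    set l1 := f.toList with hl1
    set l2 := s.toList with hl2
    show kaLoopA (PySem.Dict.counter l1).items (PySem.Dict.counter l2) k 0
        = decide (PySem.Str.len f
            - kaCommon (PySem.List.sorted l1 (fun c => c) false)
                (PySem.List.sorted l2 (fun c => c) false) ≤ k)
    rw [kaLoopA_eq]
    have hSA : kaSurplus (PySem.Dict.counter l1).items (PySem.Dict.counter l2)
        = ∑ c ∈ l1.toFinset, max 0 ((l1.count c : Int) - (l2.count c : Int)) := by
      rw [kaSurplus, PySem.Dict.items_counter, List.map_map]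
      have hmc : ((PySem.Set.ofList l1).map
          ((fun p : Char × Int => max 0 (p.2 - (PySem.Dict.counter l2).getD p.1 0)) ∘
           (fun c => (c, (l1.count c : Int))))).sum
          = ((PySem.Set.ofList l1).map
              (fun c => max 0 ((l1.count c : Int) - (l2.count c : Int)))).sum := by
        congr 1
        apply List.map_congr_left
        intro c _
        simp [Function.comp, PySem.Dict.getD_counter]
      rw [hmc, sum_map_nodup _ (PySem.Set.nodup_ofList l1)]
      congr 1
      apply Finset.ext
      intro c
      simp [PySem.Set.mem_ofList]
    rw [hSA, surplus_eq_length_sub_inter l1 l2]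
    have hsorted1 := PySem.List.sorted_pairwise l1 (fun c : Char => c)
    have hsorted2 := PySem.List.sorted_pairwise l2 (fun c : Char => c)
    rw [kaCommon_eq _ _ hsorted1 hsorted2]
    have hperm1 : ((PySem.List.sorted l1 (fun c : Char => c) false : List Char) : Multiset Char)
        = (l1 : Multiset Char) := Multiset.coe_eq_coe.mpr (PySem.List.sorted_perm l1 _ _)
    have hperm2 : ((PySem.List.sorted l2 (fun c : Char => c) false : List Char) : Multiset Char)
        = (l2 : Multiset Char) := Multiset.coe_eq_coe.mpr (PySem.List.sorted_perm l2 _ _)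
    rw [hperm1, hperm2]
    have hlenf : PySem.Str.len f = (l1.length : Int) := by
      simp [PySem.Str.len_eq, hl1]
    rw [hlenf]
    simp only [zero_add]
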